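-- pv_equiv track=rewrite | github.com/npaulinastevia/Sequoia | utils/utils.py | n_consecutive
-- ===== SOURCE A (Python) =====
-- from typing import (Any, Deque, Dict, Iterable, List, MutableMapping, Optional,
--                     Tuple, TypeVar, Union)
--
-- T = TypeVar("T")
--
-- def n_consecutive(items: Iterable[T], n: int=2, yield_last_batch=True) -> Iterable[Tuple[T, ...]]:
--     values: List[T] = []
--     for item in items:
--         values.append(item)
--         if len(values) == n:
--             yield tuple(values)
--             values.clear()
--     if values and yield_last_batch:
--         yield tuple(values)
-- ===== SOURCE B (Python) =====
-- from itertools import islice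
--
-- def n_consecutive(items, n=2, yield_last_batch=True):
--     it = iter(items)
--     if n < 1:
--         rest = tuple(it)
--         if rest and yield_last_batch:
--             yield rest
--         return
--     while True:
--         batch = tuple(islice(it, n))
--         if len(batch) == n:
--             yield batch
--         else:
--             if batch and yield_last_batch:
--                 yield batch
--             return
-- ===== Notes on version B (the rewrite author's own statement) =====
-- stated objective: idiomatic
-- what changed: B pulls whole chunks with itertools.islice instead of appending items one by one into a Python-level buffer and checking its length, with an explicit guard for n < 1 where the whole input is one final batch.
import Mathlib
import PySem

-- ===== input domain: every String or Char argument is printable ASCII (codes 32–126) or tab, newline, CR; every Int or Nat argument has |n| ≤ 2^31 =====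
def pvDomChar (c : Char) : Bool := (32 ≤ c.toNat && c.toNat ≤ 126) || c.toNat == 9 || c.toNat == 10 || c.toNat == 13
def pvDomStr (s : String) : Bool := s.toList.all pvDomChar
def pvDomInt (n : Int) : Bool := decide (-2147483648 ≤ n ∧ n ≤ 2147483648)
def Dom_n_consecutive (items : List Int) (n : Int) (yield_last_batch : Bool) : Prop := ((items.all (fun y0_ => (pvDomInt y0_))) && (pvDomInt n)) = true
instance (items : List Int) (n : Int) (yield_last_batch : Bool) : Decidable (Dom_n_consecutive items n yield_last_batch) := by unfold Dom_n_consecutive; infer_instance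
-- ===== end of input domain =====

-- B batches with whole-chunk pulls (islice-style take/drop) instead of A's one-by-one buffer append; same results, idiomatic decomposition.


-- ===== PORT A =====
-- one fold step of A's for-loop: append the item to the buffer, flush when it reaches n
def nConsecStepA (n : Int) (s : List (List Int) × List Int) (item : Int) : List (List Int) × List Int :=
  let values := s.2 ++ [item]
  if (values.length : Int) = n then (s.1 ++ [values], ([] : List Int)) else (s.1, values)

def n_consecutive (items : List Int) (n : Int) (yield_last_batch : Bool) : List (List Int) :=
  let r := items.foldl (nConsecStepA n) ([], [])
  if r.2 ≠ [] ∧ yield_last_batch = true then r.1 ++ [r.2] else r.1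

-- ===== PORT B =====
-- B's while-loop pulling chunks of size m+1 (m+1 = n.toNat, guaranteed ≥ 1 by the caller's n < 1 guard)
def nConsecChunks (xs : List Int) (m : Nat) (yield_last_batch : Bool) : List (List Int) :=
  let batch := xs.take (m + 1)
  if h : batch.length = m + 1 then
    batch :: nConsecChunks (xs.drop (m + 1)) m yield_last_batch
  else
    if batch ≠ [] ∧ yield_last_batch = true then [batch] else []
termination_by xs.length
decreasing_by
  have h2 : (List.take (m + 1) xs).length = m + 1 := h
  simp only [List.length_take] at h2
  simp only [List.length_drop]
  omega

def n_consecutive_alt (items : List Int) (n : Int) (yield_last_batch : Bool) : List (List Int) :=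
  if n < 1 then
    if items ≠ [] ∧ yield_last_batch = true then [items] else []
  else
    nConsecChunks items (n.toNat - 1) yield_last_batch

-- ===== PRECONDITION & SPEC =====
def Spec_n_consecutive (items : List Int) (n : Int) (yield_last_batch : Bool) (out : List (List Int)) : Prop := out = n_consecutive_alt items n yield_last_batch
instance (items : List Int) (n : Int) (yield_last_batch : Bool) (out : List (List Int)) : Decidable (Spec_n_consecutive items n yield_last_batch out) := by unfold Spec_n_consecutive; infer_instance

-- ===== CLAIM (what is proved, stated in full; the proofs are below) =====
def Claim_equal_n_consecutive : Prop := ∀ (items : List Int) (n : Int) (yield_last_batch : Bool), Dom_n_consecutive items n yield_last_batch → Spec_n_consecutive items n yield_last_batch (n_consecutive items n yield_last_batch)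

-- ===== LEMMAS AND PROOFS =====

lemma stepA_flush (n : Int) (acc : List (List Int)) (buf : List Int) (x : Int)
    (h : ((buf ++ [x]).length : Int) = n) :
    nConsecStepA n (acc, buf) x = (acc ++ [buf ++ [x]], []) := by
  have h' : ((buf.length : Int) + 1) = n := by simpa using h
  simp [nConsecStepA, h']

lemma stepA_keep (n : Int) (acc : List (List Int)) (buf : List Int) (x : Int)
    (h : ((buf ++ [x]).length : Int) ≠ n) :
    nConsecStepA n (acc, buf) x = (acc, buf ++ [x]) := by
  have h' : ¬ ((buf.length : Int) + 1) = n := by simpa using h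
  simp [nConsecStepA, h']

-- when n < 1 the flush condition never fires: the fold just accumulates the buffer
lemma foldA_small (n : Int) (hn : n < 1) (xs : List Int) :
    ∀ (acc : List (List Int)) (buf : List Int),
      xs.foldl (nConsecStepA n) (acc, buf) = (acc, buf ++ xs) := by
  induction xs with
  | nil => intro acc buf; simp
  | cons x xs ih =>
    intro acc buf
    rw [List.foldl_cons, stepA_keep n acc buf x (by simp [List.length_append]; omega), ih]
    simp

-- B's loop on ys ++ xs with a full first batch ys yields ys then recurses on xs
lemma nConsecChunks_step (m : Nat) (yb : Bool) (ys xs : List Int) (h : ys.length = m + 1) :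
    nConsecChunks (ys ++ xs) m yb = ys :: nConsecChunks xs m yb := by
  rw [nConsecChunks.eq_def]
  have htake : (ys ++ xs).take (m+1) = ys := by
    rw [List.take_append_of_le_length (by omega), List.take_of_length_le (by omega)]
  have hdrop : (ys ++ xs).drop (m+1) = xs := by
    rw [List.drop_append_of_le_length (by omega)]
    simp [h]
  simp only [htake, hdrop]
  rw [dif_pos h]

-- main invariant: with a partial buffer of length ≤ m, finishing A's fold equals
-- acc ++ B's chunking of buf ++ xs with chunk size m+1
lemma foldA_chunks (m : Nat) (yb : Bool) (xs : List Int) :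
    ∀ (acc : List (List Int)) (buf : List Int), buf.length ≤ m →
      (if (xs.foldl (nConsecStepA ((m : Int) + 1)) (acc, buf)).2 ≠ [] ∧ yb = true
       then (xs.foldl (nConsecStepA ((m : Int) + 1)) (acc, buf)).1
              ++ [(xs.foldl (nConsecStepA ((m : Int) + 1)) (acc, buf)).2]
       else (xs.foldl (nConsecStepA ((m : Int) + 1)) (acc, buf)).1)
      = acc ++ nConsecChunks (buf ++ xs) m yb := by
  induction xs with
  | nil =>
    intro acc buf hbuf
    have htake : buf.take (m+1) = buf := List.take_of_length_le (by omega)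
    rw [nConsecChunks.eq_def]
    simp only [List.append_nil, htake, List.foldl_nil]
    rw [dif_neg (by omega)]
    split_ifs <;> simp_all
  | cons x xs ih =>
    intro acc buf hbuf
    by_cases hfull : buf.length = m
    · -- buffer fills to m+1: flush
      have hlen1 : (buf ++ [x]).length = m + 1 := by simp [hfull]
      rw [List.foldl_cons,
        stepA_flush _ acc buf x (by simp [List.length_append, hfull]),
        ih (acc ++ [buf ++ [x]]) [] (by simp),
        show buf ++ x :: xs = (buf ++ [x]) ++ xs by simp,
        nConsecChunks_step m yb (buf ++ [x]) xs hlen1]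
      simp
    · -- buffer still short
      have hlt : buf.length < m := by omega
      rw [List.foldl_cons,
        stepA_keep _ acc buf x (by simp [List.length_append]; omega),
        ih acc (buf ++ [x]) (by simp; omega)]
      simp

-- ===== VERDICT (by name: the statement is the Claim_ definition above) =====
theorem n_consecutive_spec : Claim_equal_n_consecutive := by
  intro items n yb _
  unfold Spec_n_consecutive n_consecutive n_consecutive_alt
  by_cases hn : n < 1
  · rw [if_pos hn]
    simp only [foldA_small n hn items ([] : List (List Int)) ([] : List Int), List.nil_append]
  · rw [if_neg hn]
    have hm : n = ((n.toNat - 1 : Nat) : Int) + 1 := by omega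
    rw [hm]
    have := foldA_chunks (n.toNat - 1) yb items [] [] (by simp)
    simpa using this
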